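-- pv_equiv track=rewrite | github.com/m-a-huber/SoaPy | hf_nemethi.py | reduced_sequence
-- ===== SOURCE A (Python) =====
-- def kill_repetitions(tau):
--     tau_norep = [tau[0]]
--     for i in range(1, len(tau)):
--         if not tau[i] == tau[i-1]:
--             tau_norep.append(tau[i])
--     return tau_norep
--
-- def reduced_sequence(tau):
--     tau = kill_repetitions(tau)
--     red_tau = [tau[0]]
--     for i in range(1,len(tau)):
--         if i == len(tau)-1:
--             red_tau.append(tau[i])
--         elif tau[i] >= tau[i-1] and tau[i] >= tau[i+1]:
--             red_tau.append(tau[i])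
--         elif tau[i] <= tau[i-1] and tau[i] <= tau[i+1]:
--             red_tau.append(tau[i])
--     return red_tau
-- ===== SOURCE B (Python) =====
-- def reduced_sequence(tau):
--     out = []
--     prev = tau[0]
--     direction = 0
--     for x in tau[1:]:
--         if x == prev:
--             continue
--         d = 1 if x > prev else -1
--         if d != direction:
--             out.append(prev)
--         direction = d
--         prev = x
--     out.append(prev)
--     return out
-- ===== Notes on version B (the rewrite author's own statement) =====
-- stated objective: faster
-- what changed: Replaces the two-pass scheme (deduplicate into an intermediate list, then re-scan it comparing indexed neighbours tau[i-1],tau[i],tau[i+1]) by a single pass over the original list that tracks the last distinct value and the current slope sign, emitting the previous value whenever the direction changes and the final value at the end.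
import Mathlib
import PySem

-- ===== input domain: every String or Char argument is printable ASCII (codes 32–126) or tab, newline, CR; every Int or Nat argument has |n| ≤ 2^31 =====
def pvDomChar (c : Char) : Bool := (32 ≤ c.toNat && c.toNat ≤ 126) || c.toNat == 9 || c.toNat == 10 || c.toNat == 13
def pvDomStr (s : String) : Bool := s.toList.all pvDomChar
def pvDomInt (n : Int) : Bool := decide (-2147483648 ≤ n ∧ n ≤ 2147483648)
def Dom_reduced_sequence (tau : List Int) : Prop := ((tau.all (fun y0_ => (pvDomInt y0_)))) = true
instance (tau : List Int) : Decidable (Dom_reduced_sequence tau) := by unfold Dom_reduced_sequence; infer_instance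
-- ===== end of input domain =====

-- B is a single direction-tracking pass over the original list instead of A's
-- dedup-then-rescan-with-three-indices scheme; same O(n) cost, different decomposition.

-- ===== PORT A =====
-- tau[0] raises IndexError on []; that input is excluded by Pre_, the [] arm is unreachable there.
def kill_repetitions (tau : List Int) : List Int :=
  match tau with
  | [] => []
  | t0 :: _ =>
    (PySem.List.pyRange 1 (tau.length : Int) 1).foldl
      (fun acc i =>
        if ¬ (PySem.List.pyGetD tau i 0 = PySem.List.pyGetD tau (i - 1) 0) then
          acc ++ [PySem.List.pyGetD tau i 0]
        else acc)
      [t0]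

def reduced_sequence (tau : List Int) : List Int :=
  match kill_repetitions tau with
  | [] => []
  | t0 :: rest =>
    let t := t0 :: rest
    (PySem.List.pyRange 1 (t.length : Int) 1).foldl
      (fun acc i =>
        if i = (t.length : Int) - 1 then acc ++ [PySem.List.pyGetD t i 0]
        else if PySem.List.pyGetD t i 0 ≥ PySem.List.pyGetD t (i - 1) 0 ∧
                PySem.List.pyGetD t i 0 ≥ PySem.List.pyGetD t (i + 1) 0 then
          acc ++ [PySem.List.pyGetD t i 0]
        else if PySem.List.pyGetD t i 0 ≤ PySem.List.pyGetD t (i - 1) 0 ∧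
                PySem.List.pyGetD t i 0 ≤ PySem.List.pyGetD t (i + 1) 0 then
          acc ++ [PySem.List.pyGetD t i 0]
        else acc)
      [t0]

-- ===== PORT B =====
-- state = (out, prev, direction); skip repeats, emit prev on direction change, emit prev at the end
def reduced_sequence_alt (tau : List Int) : List Int :=
  match tau with
  | [] => []
  | t0 :: rest =>
    let s := rest.foldl
      (fun (st : List Int × Int × Int) x =>
        if x = st.2.1 then st
        else
          let d : Int := if x > st.2.1 then 1 else -1
          ((if d ≠ st.2.2 then st.1 ++ [st.2.1] else st.1), x, d))
      ([], t0, 0)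
    s.1 ++ [s.2.1]

-- ===== PRECONDITION & SPEC =====
-- Pre_ excludes only the empty list, on which A (tau[0]) raises IndexError.
def Pre_reduced_sequence (tau : List Int) : Prop := tau ≠ []
instance (tau : List Int) : Decidable (Pre_reduced_sequence tau) := by unfold Pre_reduced_sequence; infer_instance
def pvWitness_reduced_sequence : List Int := ([1, 2, 2, 1, 3])

def Spec_reduced_sequence (tau : List Int) (out : List Int) : Prop := out = reduced_sequence_alt tau
instance (tau : List Int) (out : List Int) : Decidable (Spec_reduced_sequence tau out) := by unfold Spec_reduced_sequence; infer_instance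

-- ===== CLAIM (what is proved, stated in full; the proofs are below) =====
def Claim_equal_reduced_sequence : Prop := ∀ (tau : List Int), Dom_reduced_sequence tau → Pre_reduced_sequence tau → Spec_reduced_sequence tau (reduced_sequence tau)

-- ===== LEMMAS AND PROOFS =====

-- consecutive-deduplication, structurally
def pvDD : Int → List Int → List Int
  | _, [] => []
  | p, x :: xs => if x = p then pvDD p xs else x :: pvDD x xs

-- the kept tail of A's second loop, structurally
def pvRedTail : Int → List Int → List Int
  | _, [] => []
  | _, [x] => [x]
  | p, x :: y :: ys =>
      (if (x ≥ p ∧ x ≥ y) ∨ (x ≤ p ∧ x ≤ y) then [x] else []) ++ pvRedTail x (y :: ys)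

def pvDSign (p x : Int) : Int := if x > p then 1 else -1

-- B's emission on an already-destuttered stream, from prev p with incoming direction dir
def pvK : Int → Int → List Int → List Int
  | _, p, [] => [p]
  | dir, p, x :: xs =>
      (if pvDSign p x ≠ dir then [p] else []) ++ pvK (pvDSign p x) x xs

theorem pvDD_chain (l : List Int) : ∀ p : Int, List.IsChain (· ≠ ·) (p :: pvDD p l) := by
  induction l with
  | nil => intro p; simp [pvDD]
  | cons x xs ih =>
    intro p
    by_cases h : x = p
    · simpa [pvDD, h] using ih p
    · simpa [pvDD, h] using List.IsChain.cons_cons (by omega : p ≠ x) (ih x)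

theorem pvL1 (t : List Int) (l : List Int) : ∀ (j : Int) (acc : List Int),
    1 ≤ j → t.drop j.toNat = l →
    (PySem.List.pyRange j (t.length : Int) 1).foldl
      (fun acc i =>
        if ¬ (PySem.List.pyGetD t i 0 = PySem.List.pyGetD t (i - 1) 0) then
          acc ++ [PySem.List.pyGetD t i 0]
        else acc) acc
      = acc ++ pvDD (PySem.List.pyGetD t (j - 1) 0) l := by
  induction l with
  | nil =>
    intro j acc hj hd
    have hlen : t.length ≤ j.toNat := by
      simpa [List.drop_eq_nil_iff] using hd
    have : (t.length : Int) ≤ j := by omega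
    rw [PySem.List.pyRange_one_eq_nil this]
    simp [pvDD]
  | cons x xs ih =>
    intro j acc hj hd
    have hjt : j.toNat < t.length := by
      have := congrArg List.length hd
      simp at this; omega
    have hx : t[j.toNat]'hjt = x := by
      have h1 := congrArg (fun l => l.head?) hd
      simp only [List.head?_drop, List.head?_cons] at h1
      simpa [List.getElem?_eq_getElem hjt] using h1
    have hgj : PySem.List.pyGetD t j 0 = x := by
      rw [PySem.List.pyGetD_eq_getElem t 0 (by omega) (by omega)]
      exact hx
    have hlt : j < (t.length : Int) := by omega
    rw [PySem.List.pyRange_one_cons hlt]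
    have hd' : t.drop (j + 1).toNat = xs := by
      have : (j + 1).toNat = j.toNat + 1 := by omega
      rw [this, ← List.drop_drop]
      simp [hd]
    have hprev : PySem.List.pyGetD t ((j + 1) - 1) 0 = x := by
      simpa using hgj
    rw [List.foldl_cons]
    by_cases h : x = PySem.List.pyGetD t (j - 1) 0
    · have e1 : (if ¬ (PySem.List.pyGetD t j 0 = PySem.List.pyGetD t (j - 1) 0) then
          acc ++ [PySem.List.pyGetD t j 0] else acc) = acc := by
        rw [hgj]; simp [h]
      rw [e1]
      have hih := ih (j + 1) acc (by omega) hd'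
      rw [hprev] at hih
      rw [hih, pvDD, if_pos h, ← h]
    · have e1 : (if ¬ (PySem.List.pyGetD t j 0 = PySem.List.pyGetD t (j - 1) 0) then
          acc ++ [PySem.List.pyGetD t j 0] else acc) = acc ++ [x] := by
        rw [hgj]; simp [h]
      rw [e1]
      have hih := ih (j + 1) (acc ++ [x]) (by omega) hd'
      rw [hprev] at hih
      rw [hih, pvDD, if_neg h]
      simp

theorem pvL2 (t : List Int) (l : List Int) : ∀ (j : Int) (acc : List Int),
    1 ≤ j → t.drop j.toNat = l →
    (PySem.List.pyRange j (t.length : Int) 1).foldl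
      (fun acc i =>
        if i = (t.length : Int) - 1 then acc ++ [PySem.List.pyGetD t i 0]
        else if PySem.List.pyGetD t i 0 ≥ PySem.List.pyGetD t (i - 1) 0 ∧
                PySem.List.pyGetD t i 0 ≥ PySem.List.pyGetD t (i + 1) 0 then
          acc ++ [PySem.List.pyGetD t i 0]
        else if PySem.List.pyGetD t i 0 ≤ PySem.List.pyGetD t (i - 1) 0 ∧
                PySem.List.pyGetD t i 0 ≤ PySem.List.pyGetD t (i + 1) 0 then
          acc ++ [PySem.List.pyGetD t i 0]
        else acc) acc
      = acc ++ pvRedTail (PySem.List.pyGetD t (j - 1) 0) l := by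
  induction l with
  | nil =>
    intro j acc hj hd
    have hlen : t.length ≤ j.toNat := by
      simpa [List.drop_eq_nil_iff] using hd
    have : (t.length : Int) ≤ j := by omega
    rw [PySem.List.pyRange_one_eq_nil this]
    simp [pvRedTail]
  | cons x xs ih =>
    intro j acc hj hd
    have hjt : j.toNat < t.length := by
      have := congrArg List.length hd
      simp at this; omega
    have hx : t[j.toNat]'hjt = x := by
      have h1 := congrArg (fun l => l.head?) hd
      simp only [List.head?_drop, List.head?_cons] at h1
      simpa [List.getElem?_eq_getElem hjt] using h1
    have hgj : PySem.List.pyGetD t j 0 = x := by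
      rw [PySem.List.pyGetD_eq_getElem t 0 (by omega) (by omega)]
      exact hx
    have hlt : j < (t.length : Int) := by omega
    rw [PySem.List.pyRange_one_cons hlt]
    have hd' : t.drop (j + 1).toNat = xs := by
      have : (j + 1).toNat = j.toNat + 1 := by omega
      rw [this, ← List.drop_drop]
      simp [hd]
    have hprev : PySem.List.pyGetD t ((j + 1) - 1) 0 = x := by
      simpa using hgj
    cases xs with
    | nil =>
      have hlast : t.length = j.toNat + 1 := by
        have := congrArg List.length hd
        simp at this; omega
      have hj1 : j = (t.length : Int) - 1 := by omega
      simp only [List.foldl_cons, hgj, if_pos hj1]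
      have := ih (j + 1) (acc ++ [x]) (by omega) hd'
      rw [hprev] at this
      rw [this]
      simp [pvRedTail]
    | cons y ys =>
      have hlen2 : j.toNat + 2 ≤ t.length := by
        have := congrArg List.length hd
        simp at this; omega
      have hnl : ¬ (j = (t.length : Int) - 1) := by omega
      have hy : t[j.toNat + 1]'(by omega) = y := by
        have h2 : t.drop (j.toNat + 1) = y :: ys := by
          rw [← List.drop_drop]; simp [hd]
        have h1 := congrArg (fun l => l.head?) h2
        simp only [List.head?_drop, List.head?_cons] at h1
        simpa [List.getElem?_eq_getElem (by omega : j.toNat + 1 < t.length)] using h1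
      have hgj1 : PySem.List.pyGetD t (j + 1) 0 = y := by
        rw [PySem.List.pyGetD_eq_getElem t 0 (by omega) (by omega)]
        have : (j + 1).toNat = j.toNat + 1 := by omega
        simp only [this]
        exact hy
      have hihy := ih (j + 1)
      rw [hprev] at hihy
      simp only [List.foldl_cons, hgj, hgj1, if_neg hnl]
      set p := PySem.List.pyGetD t (j - 1) 0 with hp
      by_cases hc : (x ≥ p ∧ x ≥ y) ∨ (x ≤ p ∧ x ≤ y)
      · have harm :
          (if x ≥ p ∧ x ≥ y then acc ++ [x]
           else if x ≤ p ∧ x ≤ y then acc ++ [x] else acc) = acc ++ [x] := by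
          rcases hc with h | h
          · rw [if_pos h]
          · by_cases h1 : x ≥ p ∧ x ≥ y
            · rw [if_pos h1]
            · rw [if_neg h1, if_pos h]
        rw [harm, hihy (acc ++ [x]) (by omega) hd']
        rw [pvRedTail, if_pos hc]
        simp
      · push_neg at hc
        have harm :
          (if x ≥ p ∧ x ≥ y then acc ++ [x]
           else if x ≤ p ∧ x ≤ y then acc ++ [x] else acc) = acc := by
          rw [if_neg, if_neg]
          · intro h; exact absurd h.2 (not_le.mpr (hc.2 h.1))
          · intro h; exact absurd h.2 (not_le.mpr (hc.1 h.1))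
        rw [harm, hihy acc (by omega) hd']
        rw [pvRedTail, if_neg]
        · simp
        · rintro (h | h)
          · exact absurd h.2 (not_le.mpr (hc.1 h.1))
          · exact absurd h.2 (not_le.mpr (hc.2 h.1))

-- B's fold, characterised through pvDD and pvK
theorem pvB1 (l : List Int) : ∀ (acc : List Int) (p dir : Int),
    (let s := l.foldl
      (fun (st : List Int × Int × Int) x =>
        if x = st.2.1 then st
        else
          let d : Int := if x > st.2.1 then 1 else -1
          ((if d ≠ st.2.2 then st.1 ++ [st.2.1] else st.1), x, d))
      (acc, p, dir)
     s.1 ++ [s.2.1])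
      = acc ++ pvK dir p (pvDD p l) := by
  induction l with
  | nil => intro acc p dir; simp [pvK, pvDD]
  | cons x xs ih =>
    intro acc p dir
    by_cases h : x = p
    · simpa [pvDD, h] using ih acc p dir
    · simp only [List.foldl_cons, if_neg h]
      rw [pvDD, if_neg h, pvK]
      by_cases hdir : (if x > p then (1 : Int) else -1) ≠ dir
      · rw [if_pos hdir]
        have := ih (acc ++ [p]) x (if x > p then (1 : Int) else -1)
        simp only [this, pvDSign]
        rw [if_pos hdir]
        simp
      · rw [if_neg hdir]
        have := ih acc x (if x > p then (1 : Int) else -1)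
        simp only [this, pvDSign]
        rw [if_neg hdir]
        simp

theorem pvK2 (xs : List Int) : ∀ (p x : Int), List.IsChain (· ≠ ·) (p :: x :: xs) →
    pvK (pvDSign p x) x xs = pvRedTail p (x :: xs) := by
  induction xs with
  | nil => intro p x _; simp [pvK, pvRedTail]
  | cons y ys ih =>
    intro p x hch
    rcases List.isChain_cons_cons.mp hch with ⟨hpx, hch'⟩
    rcases List.isChain_cons_cons.mp hch' with ⟨hxy, _⟩
    rw [pvK, ih x y hch', pvRedTail]
    congr 1
    have hiff : pvDSign x y ≠ pvDSign p x ↔ ((x ≥ p ∧ x ≥ y) ∨ (x ≤ p ∧ x ≤ y)) := by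
      unfold pvDSign
      by_cases h1 : y > x <;> by_cases h2 : x > p <;> simp [h1, h2] <;> omega
    by_cases hc : (x ≥ p ∧ x ≥ y) ∨ (x ≤ p ∧ x ≤ y)
    · rw [if_pos (hiff.mpr hc), if_pos hc]
    · rw [if_neg (fun h => hc (hiff.mp h)), if_neg hc]

theorem pvK0 (p : Int) (m : List Int) (hch : List.IsChain (· ≠ ·) (p :: m)) :
    pvK 0 p m = p :: pvRedTail p m := by
  cases m with
  | nil => simp [pvK, pvRedTail]
  | cons x xs =>
    rw [pvK, pvK2 xs p x hch]
    have : pvDSign p x ≠ 0 := by unfold pvDSign; split <;> omega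
    rw [if_pos this]
    simp

theorem pvKillRep (t0 : Int) (rest : List Int) :
    kill_repetitions (t0 :: rest) = t0 :: pvDD t0 rest := by
  unfold kill_repetitions
  have h := pvL1 (t0 :: rest) rest 1 [t0] (by omega) (by simp)
  simp only [show ((1 : Int) - 1) = 0 by omega] at h
  have h0 : PySem.List.pyGetD (t0 :: rest) 0 0 = t0 := by
    rw [PySem.List.pyGetD_of_nonneg _ _ (by omega)]; simp
  rw [h0] at h
  simpa using h

-- ===== VERDICT (by name: the statement is the Claim_ definition above) =====
theorem reduced_sequence_spec : Claim_equal_reduced_sequence := by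
  intro tau _ hpre
  unfold Spec_reduced_sequence
  cases tau with
  | nil => exact absurd rfl hpre
  | cons t0 rest =>
    unfold reduced_sequence reduced_sequence_alt
    rw [pvKillRep]
    simp only []
    have hA := pvL2 (t0 :: pvDD t0 rest) (pvDD t0 rest) 1 [t0] (by omega) (by simp)
    simp only [show ((1 : Int) - 1) = 0 by omega] at hA
    have h0 : PySem.List.pyGetD (t0 :: pvDD t0 rest) 0 0 = t0 := by
      rw [PySem.List.pyGetD_of_nonneg _ _ (by omega)]; simp
    rw [h0] at hA
    rw [hA]
    have hB := pvB1 rest [] t0 0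
    simp only at hB
    rw [hB, pvK0 t0 (pvDD t0 rest) (pvDD_chain rest t0)]
    simp
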